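-- pv_equiv track=rewrite | github.com/mostgood1/NFL-Betting | nfl_compare/src/sim_engine.py | _valid_game_totals
-- ===== SOURCE A (Python) =====
-- def _valid_team_scores(max_points: int = 90) -> set[int]:
--     """Return the set of team point totals reachable by {2,3,6,7,8} scoring plays."""
--     max_points = int(max(0, max_points))
--     allowed = (2, 3, 6, 7, 8)
--     reachable = {0}
--     for p in range(1, max_points + 1):
--         ok = False
--         for a in allowed:
--             if p - a >= 0 and (p - a) in reachable:
--                 ok = True
--                 break
--         if ok:
--             reachable.add(p)
--     return reachable
--
-- def _valid_game_totals(max_total: int = 90) -> set[int]: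
--     team = _valid_team_scores(max_points=max_total)
--     totals: set[int] = set()
--     for h in team:
--         for a in team:
--             s = h + a
--             if 0 <= s <= int(max_total):
--                 totals.add(int(s))
--     return totals
-- ===== SOURCE B (Python) =====
-- def _valid_game_totals(max_total: int = 90) -> set[int]:
--     # Closed form: with scoring plays {2,3,6,7,8}, every team total except 1 is
--     # reachable, so game totals are zero plus every integer from 2 up to max_total.
--     m = int(max_total)
--     if m < 0:
--         return set()
--     return {0} | set(range(2, m + 1))
-- ===== Notes on version B (the rewrite author's own statement) =====
-- stated objective: faster
-- what changed: Replaced the DP reachability loop plus quadratic pairwise-sum enumeration by a closed form: zero together with the range 2..max_total (only total 1 is unreachable).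
import Mathlib
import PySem

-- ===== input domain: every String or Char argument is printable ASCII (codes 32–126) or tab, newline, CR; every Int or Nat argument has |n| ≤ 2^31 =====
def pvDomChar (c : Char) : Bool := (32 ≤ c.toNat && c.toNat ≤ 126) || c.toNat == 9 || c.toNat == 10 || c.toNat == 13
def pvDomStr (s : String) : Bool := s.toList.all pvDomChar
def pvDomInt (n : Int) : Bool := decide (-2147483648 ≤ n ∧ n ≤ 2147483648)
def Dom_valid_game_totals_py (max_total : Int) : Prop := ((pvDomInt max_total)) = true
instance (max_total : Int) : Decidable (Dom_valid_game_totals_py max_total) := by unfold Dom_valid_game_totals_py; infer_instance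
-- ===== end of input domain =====

-- B replaces A's dynamic-programming reachability loop + quadratic pairwise-sum
-- enumeration by a closed form: zero together with every integer from 2 up to max_total (only total 1 is unreachable).


-- ===== PORT A =====
-- _valid_team_scores: DP over 1..max_points testing reachability by plays {2,3,6,7,8}
def valid_team_scores_py (max_points : Int) : PySem.Set Int :=
  let mp : Int := max 0 max_points
  let allowed : List Int := [2, 3, 6, 7, 8]
  (PySem.List.pyRange 1 (mp + 1) 1).foldl
    (fun reachable p =>
      -- the inner 'for a in allowed: … break' is an any-scan over allowed
      if allowed.any (fun a => decide (0 ≤ p - a) && PySem.Set.contains reachable (p - a))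
      then PySem.Set.add reachable p else reachable)
    (PySem.Set.ofList [0])

def valid_game_totals_py (max_total : Int) : List Int :=
  let team := valid_team_scores_py max_total
  team.foldl
    (fun totals h =>
      team.foldl
        (fun totals a =>
          let s := h + a
          if 0 ≤ s ∧ s ≤ max_total then PySem.Set.add totals s else totals)
        totals)
    PySem.Set.empty

-- ===== PORT B =====
def valid_game_totals_py_alt (max_total : Int) : List Int :=
  if max_total < 0 then PySem.Set.empty
  else PySem.Set.union (PySem.Set.ofList [0]) (PySem.List.pyRange 2 (max_total + 1) 1)

-- ===== PRECONDITION & SPEC =====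
def Spec_valid_game_totals_py (max_total : Int) (out : List Int) : Prop := out = valid_game_totals_py_alt max_total
instance (max_total : Int) (out : List Int) : Decidable (Spec_valid_game_totals_py max_total out) := by unfold Spec_valid_game_totals_py; infer_instance

-- ===== CLAIM (what is proved, stated in full; the proofs are below) =====
def Claim_equal_valid_game_totals_py : Prop := ∀ (max_total : Int), Dom_valid_game_totals_py max_total → Spec_valid_game_totals_py max_total (valid_game_totals_py max_total)

-- ===== LEMMAS AND PROOFS =====

-- the common value of both sides for max_total = n ≥ 0: 0 followed by 2..n
def pvCanon (n : Int) : List Int := 0 :: PySem.List.pyRange 2 (n + 1) 1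

theorem mem_pvCanon {n x : Int} : x ∈ pvCanon n ↔ x = 0 ∨ (2 ≤ x ∧ x ≤ n) := by
  simp only [pvCanon, List.mem_cons, PySem.List.mem_pyRange_one]
  omega

theorem nodup_pvCanon (n : Int) : (pvCanon n).Nodup := by
  refine List.nodup_cons.mpr ⟨?_, PySem.List.nodup_pyRange_one 2 (n + 1)⟩
  simp [PySem.List.mem_pyRange_one]

theorem contains_eq_mem (l : List Int) (x : Int) :
    PySem.Set.contains l x = decide (x ∈ l) := by
  simp [PySem.Set.contains]

theorem add_of_mem {l : List Int} {x : Int} (h : x ∈ l) : PySem.Set.add l x = l := by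
  simp [PySem.Set.add, h]

theorem add_of_not_mem {l : List Int} {x : Int} (h : x ∉ l) :
    PySem.Set.add l x = l ++ [x] := by
  simp [PySem.Set.add, h]

-- let-free unfoldings of the two ports (definitional)
theorem team_unfold (x : Int) : valid_team_scores_py x =
    (PySem.List.pyRange 1 (max 0 x + 1) 1).foldl
      (fun reachable p =>
        if ([2,3,6,7,8] : List Int).any
            (fun a => decide (0 ≤ p - a) && PySem.Set.contains reachable (p - a))
        then PySem.Set.add reachable p else reachable)
      (PySem.Set.ofList [0]) := rfl

theorem totals_unfold (x : Int) : valid_game_totals_py x =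
    (valid_team_scores_py x).foldl
      (fun totals h =>
        (valid_team_scores_py x).foldl
          (fun totals a =>
            if 0 ≤ h + a ∧ h + a ≤ x then PySem.Set.add totals (h + a) else totals)
          totals)
      PySem.Set.empty := rfl

-- folding Set.add over fresh, duplicate-free elements appends them
theorem foldl_add_nodup (l : List Int) : ∀ s : List Int, (s ++ l).Nodup →
    l.foldl PySem.Set.add s = s ++ l := by
  induction l with
  | nil => intro s _; simp
  | cons x t ih =>
    intro s h
    have hx : x ∉ s := by
      intro hm
      rw [List.nodup_append] at h
      exact h.2.2 x hm x (by simp) rfl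
    rw [List.foldl_cons, add_of_not_mem hx, ih (s ++ [x]) (by simpa using h)]
    simp

theorem pvCanon_succ (m : Int) (hm : 1 ≤ m) : pvCanon (m + 1) = pvCanon m ++ [m + 1] := by
  unfold pvCanon
  rw [PySem.List.pyRange_one_succ_right (by omega : (2:Int) ≤ m + 1)]
  simp

-- one step of A's DP loop at p = m+1 (m ≥ 1) extends the canonical set by m+1
theorem team_step (m : Int) (hm : 1 ≤ m) :
    (if ([2,3,6,7,8] : List Int).any
        (fun a => decide (0 ≤ (m+1) - a) && PySem.Set.contains (pvCanon m) ((m+1) - a))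
     then PySem.Set.add (pvCanon m) (m+1) else pvCanon m) = pvCanon (m+1) := by
  have hcond : ([2,3,6,7,8] : List Int).any
      (fun a => decide (0 ≤ (m+1) - a) && PySem.Set.contains (pvCanon m) ((m+1) - a)) = true := by
    simp only [List.any_cons, List.any_nil, Bool.or_eq_true, Bool.and_eq_true,
      contains_eq_mem, decide_eq_true_eq, mem_pvCanon, Bool.or_false]
    rcases lt_trichotomy m 2 with h1 | h2 | h3
    · -- m = 1 : p = 2, play 2 reaches 0
      exact Or.inl ⟨by omega, Or.inl (by omega)⟩
    · -- m = 2 : p = 3, play 3 reaches 0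
      exact Or.inr (Or.inl ⟨by omega, Or.inl (by omega)⟩)
    · -- m ≥ 3 : p - 2 = m - 1 ∈ {2..m}
      exact Or.inl ⟨by omega, Or.inr (by omega)⟩
  rw [if_pos hcond, add_of_not_mem (by rw [mem_pvCanon]; omega), pvCanon_succ m hm]

theorem team_eq (n : Nat) : valid_team_scores_py (n : Int) = pvCanon (n : Int) := by
  induction n with
  | zero => decide
  | succ k ih =>
    match k, ih with
    | 0, _ => decide
    | (j+1), ih =>
      set m : Int := ((j+1 : Nat) : Int) with hmdef
      have hm : 1 ≤ m := by rw [hmdef]; omega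
      have hcast : (((j+1)+1 : Nat) : Int) = m + 1 := by rw [hmdef]; push_cast; ring
      rw [hcast]
      rw [team_unfold]
      rw [show max 0 (m+1) = m + 1 from max_eq_right (by omega)]
      rw [PySem.List.pyRange_one_succ_right (by omega : (1:Int) ≤ m + 1), List.foldl_append]
      have hpref :
          (PySem.List.pyRange 1 (m + 1) 1).foldl
            (fun reachable p =>
              if ([2,3,6,7,8] : List Int).any
                  (fun a => decide (0 ≤ p - a) && PySem.Set.contains reachable (p - a))
              then PySem.Set.add reachable p else reachable)
            (PySem.Set.ofList [0]) = pvCanon m := by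
        have := ih
        rw [team_unfold] at this
        rw [show max 0 m = m from max_eq_right (by omega)] at this
        exact this
      rw [List.foldl_cons, List.foldl_nil, hpref]
      exact team_step m hm

-- A's inner sum loop, at team score h already in the canonical set, adds nothing new
theorem inner_keep (n h : Int) (hh : h ∈ pvCanon n) :
    ∀ l : List Int, (∀ a ∈ l, a ∈ pvCanon n) →
      l.foldl (fun totals a =>
          if 0 ≤ h + a ∧ h + a ≤ n then PySem.Set.add totals (h + a) else totals)
        (pvCanon n) = pvCanon n := by
  intro l
  induction l with
  | nil => intro _; simp
  | cons a t ih =>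
    intro hall
    have ha : a ∈ pvCanon n := hall a (by simp)
    rw [List.foldl_cons]
    have hstep : (if 0 ≤ h + a ∧ h + a ≤ n then PySem.Set.add (pvCanon n) (h + a)
        else pvCanon n) = pvCanon n := by
      split_ifs with hc
      · refine add_of_mem ?_
        rw [mem_pvCanon] at hh ha ⊢
        omega
      · rfl
    rw [hstep]
    exact ih (fun x hx => hall x (by simp [hx]))

-- the first outer iteration (h = 0) already fills the whole canonical set
theorem inner_fill (n : Int) (hn : 0 ≤ n) :
    ∀ (l s : List Int), (∀ a ∈ l, a ∈ pvCanon n) → (s ++ l).Nodup →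
      l.foldl (fun totals a =>
          if 0 ≤ 0 + a ∧ 0 + a ≤ n then PySem.Set.add totals (0 + a) else totals)
        s = s ++ l := by
  intro l
  induction l with
  | nil => intro s _ _; simp
  | cons a t ih =>
    intro s hall hnd
    have ha : a ∈ pvCanon n := hall a (by simp)
    have hc : 0 ≤ 0 + a ∧ 0 + a ≤ n := by rw [mem_pvCanon] at ha; omega
    have hx : a ∉ s := by
      intro hm
      rw [List.nodup_append] at hnd
      exact hnd.2.2 a hm a (by simp) rfl
    rw [List.foldl_cons, if_pos hc, show (0:Int) + a = a from by ring, add_of_not_mem hx,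
      ih (s ++ [a]) (fun x hx => hall x (by simp [hx])) (by simpa using hnd)]
    simp

theorem totals_eq (n : Nat) : valid_game_totals_py (n : Int) = pvCanon (n : Int) := by
  have hn : (0:Int) ≤ (n : Int) := by omega
  rw [totals_unfold, team_eq n]
  -- outer fold over pvCanon n = 0 :: pyRange 2 (n+1) 1
  rw [show pvCanon (n:Int) = 0 :: PySem.List.pyRange 2 ((n:Int) + 1) 1 from rfl]
  rw [List.foldl_cons]
  -- h = 0 fills the set
  have h0 : (0 :: PySem.List.pyRange 2 ((n:Int) + 1) 1).foldl
      (fun totals a =>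
        if 0 ≤ 0 + a ∧ 0 + a ≤ (n:Int) then PySem.Set.add totals (0 + a) else totals)
      PySem.Set.empty = pvCanon (n:Int) := by
    have := inner_fill (n:Int) hn (pvCanon (n:Int)) [] (fun a ha => ha)
      (by simpa using nodup_pvCanon (n:Int))
    simpa [pvCanon] using this
  rw [show (PySem.Set.empty : List Int) = [] from rfl] at h0 ⊢
  rw [h0]
  -- remaining h ∈ pyRange 2 (n+1) 1 change nothing
  have : ∀ l : List Int, (∀ x ∈ l, x ∈ pvCanon (n:Int)) →
      l.foldl (fun totals h =>
        (0 :: PySem.List.pyRange 2 ((n:Int) + 1) 1).foldl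
          (fun totals a =>
            if 0 ≤ h + a ∧ h + a ≤ (n:Int) then PySem.Set.add totals (h + a) else totals)
          totals)
        (pvCanon (n:Int)) = pvCanon (n:Int) := by
    intro l
    induction l with
    | nil => intro _; simp
    | cons h t ih =>
      intro hall
      rw [List.foldl_cons]
      have := inner_keep (n:Int) h (hall h (by simp))
        (0 :: PySem.List.pyRange 2 ((n:Int) + 1) 1) (fun a ha => by simpa [pvCanon] using ha)
      simp only [pvCanon] at this ⊢
      rw [this]
      exact ih (fun x hx => hall x (by simp [hx]))
  exact this _ (fun x hx => by simp [pvCanon, hx])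

theorem alt_eq (n : Nat) : valid_game_totals_py_alt (n : Int) = pvCanon (n : Int) := by
  unfold valid_game_totals_py_alt
  rw [if_neg (by omega : ¬ ((n:Int) < 0))]
  have h1 : PySem.Set.union (PySem.Set.ofList ([0] : List Int))
      (PySem.List.pyRange 2 ((n:Int) + 1) 1)
      = (PySem.List.pyRange 2 ((n:Int) + 1) 1).foldl PySem.Set.add [0] := by
    simp [PySem.Set.union, PySem.Set.update, PySem.Set.ofList, PySem.Set.add]
  rw [h1, foldl_add_nodup _ [0] (by exact nodup_pvCanon (n:Int))]
  rfl

-- ===== VERDICT (by name: the statement is the Claim_ definition above) =====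
theorem valid_game_totals_py_spec : Claim_equal_valid_game_totals_py := by
  intro mt _
  unfold Spec_valid_game_totals_py
  rcases lt_or_ge mt 0 with hneg | hpos
  · -- negative max_total: team = {0}, the only sum 0 fails 0 ≤ mt, so both sides are ∅
    rw [totals_unfold, team_unfold, valid_game_totals_py_alt]
    rw [show max 0 mt = 0 from max_eq_left (by omega)]
    rw [PySem.List.pyRange_one_eq_nil (by omega : (0:Int) + 1 ≤ 1)]
    simp only [List.foldl_nil]
    rw [show (PySem.Set.ofList ([0] : List Int)) = [0] from rfl]
    rw [List.foldl_cons, List.foldl_nil, List.foldl_cons, List.foldl_nil]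
    rw [if_neg (by omega : ¬ ((0:Int) ≤ 0 + 0 ∧ 0 + 0 ≤ mt)), if_pos hneg]
  · have h1 : mt = ((mt.toNat : Nat) : Int) := by omega
    rw [h1, totals_eq, alt_eq]
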